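-- pv_equiv track=rewrite | github.com/MickaelMasson/ca_feu | feu03.py | get_sudoku_list
-- ===== SOURCE A (Python) =====
-- def get_sudoku_list(string: str) -> list[tuple[int, int, list[int]]]:
--
--     sudoku_list = []
--     x = 0
--     y = 0
--
--     for character in string:
--         if character == "\n":
--             y += 1
--             x = 0
--             continue
--         if character != ".":
--             sudoku_list.append([x, y, [int(character)]])
--         else:
--             sudoku_list.append([x, y, [1, 2, 3, 4, 5, 6, 7, 8, 9]])
--         x += 1
--
--     return sudoku_list
-- ===== SOURCE B (Python) =====
-- def get_sudoku_list(string: str) -> list[tuple[int, int, list[int]]]: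
--     return [[i - string.rfind("\n", 0, i) - 1,
--              string.count("\n", 0, i),
--              [int(ch)] if ch != "." else [1, 2, 3, 4, 5, 6, 7, 8, 9]]
--             for i, ch in enumerate(string) if ch != "\n"]
-- ===== Notes on version B (the rewrite author's own statement) =====
-- stated objective: alternative
-- what changed: B carries no running state at all: for each non-newline character it computes its coordinates independently in closed form from the whole string, x = i minus one past the position of the last newline before i (via string.rfind) and y = the number of newlines before i (via string.count), in one comprehension over enumerate(string), instead of A's streaming x/y counters.
import Mathlib
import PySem

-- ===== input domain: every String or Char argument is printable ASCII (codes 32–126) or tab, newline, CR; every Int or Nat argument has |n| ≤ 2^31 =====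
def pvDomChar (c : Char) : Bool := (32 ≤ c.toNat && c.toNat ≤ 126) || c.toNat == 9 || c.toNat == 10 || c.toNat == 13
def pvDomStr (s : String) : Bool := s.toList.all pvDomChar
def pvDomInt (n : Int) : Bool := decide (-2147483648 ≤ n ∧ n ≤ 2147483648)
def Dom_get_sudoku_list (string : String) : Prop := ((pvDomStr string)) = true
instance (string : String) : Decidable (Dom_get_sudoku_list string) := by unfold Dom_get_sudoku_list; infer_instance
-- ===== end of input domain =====

-- B is stateless: it computes each cell's coordinates in closed form from the prefix of the string
-- (rfind/count queries) instead of A's streaming x/y counters (alternative algorithm, not faster).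

-- ===== PORT A =====
-- the loop body of A (newline branch, int(character) branch, dot branch), on state (sudoku_list, x, y)
def stepA (st : List (Int × Int × List Int) × Int × Int) (character : Char) :
    List (Int × Int × List Int) × Int × Int :=
  if character = '\n' then (st.1, 0, st.2.2 + 1)
  else if character ≠ '.' then
    (st.1 ++ [(st.2.1, st.2.2, [(PySem.Int.ofChars? [character]).getD 0])], st.2.1 + 1, st.2.2)
  else
    (st.1 ++ [(st.2.1, st.2.2, [1, 2, 3, 4, 5, 6, 7, 8, 9])], st.2.1 + 1, st.2.2)

def get_sudoku_list (string : String) : List (Int × Int × List Int) :=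
  (string.toList.foldl stepA ([], 0, 0)).1

-- ===== PORT B =====
-- string.rfind("\n", 0, i), ported by hand over the prefix list (exact: index of the last '\n'
-- in the prefix, -1 if none — Python's rfind with an end bound)
def rfindNl : List Char → Int
  | [] => -1
  | c :: r => if rfindNl r = -1 then (if c = '\n' then 0 else -1) else rfindNl r + 1

-- the comprehension body of B, on the whole character list s and one (i, ch) pair of enumerate;
-- string.count("\n", 0, i) is ported as List.count '\n' on the prefix (exact for a 1-char needle)
def cellB (s : List Char) (ic : Int × Char) : Option (Int × Int × List Int) :=
  if ic.2 = '\n' then none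
  else some (ic.1 - rfindNl (s.take ic.1.toNat) - 1,
             ((s.take ic.1.toNat).count '\n' : Int),
             if ic.2 ≠ '.' then [(PySem.Int.ofChars? [ic.2]).getD 0]
             else [1, 2, 3, 4, 5, 6, 7, 8, 9])

def get_sudoku_list_alt (string : String) : List (Int × Int × List Int) :=
  (PySem.List.enumerate string.toList 0).filterMap (cellB string.toList)

-- ===== PRECONDITION & SPEC =====
-- Pre_ excludes exactly the strings containing a character that is neither a decimal digit nor a
-- dot nor a newline: on such a character int(character) raises ValueError in both A and B.
def Pre_get_sudoku_list (string : String) : Prop :=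
  string.toList.all (fun c => PySem.Chars.isdigit c || c == '.' || c == '\n') = true
instance (string : String) : Decidable (Pre_get_sudoku_list string) := by
  unfold Pre_get_sudoku_list; infer_instance

def pvWitness_get_sudoku_list : String := "1.3\n..9\n4.."

def Spec_get_sudoku_list (string : String) (out : List (Int × Int × List Int)) : Prop :=
  out = get_sudoku_list_alt string
instance (string : String) (out : List (Int × Int × List Int)) :
    Decidable (Spec_get_sudoku_list string out) := by unfold Spec_get_sudoku_list; infer_instance

-- ===== CLAIM (what is proved, stated in full; the proofs are below) =====
def Claim_equal_get_sudoku_list : Prop := ∀ (string : String), Dom_get_sudoku_list string →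
  Pre_get_sudoku_list string → Spec_get_sudoku_list string (get_sudoku_list string)

-- ===== LEMMAS AND PROOFS =====

theorem rfindNl_snoc (p : List Char) (c : Char) :
    rfindNl (p ++ [c]) = if c = '\n' then (p.length : Int) else rfindNl p := by
  induction p with
  | nil => simp [rfindNl]
  | cons a r ih =>
    simp only [List.cons_append, rfindNl, ih]
    by_cases hc : c = '\n'
    · have hne : ((r.length : Int)) ≠ -1 := by
        intro h; omega
      simp [hc, hne]
    · simp [hc]

-- loop invariant: after consuming the prefix p, A's counters are exactly B's closed forms
theorem loop_eq (s : List Char) : ∀ (cs p : List Char) (acc : List (Int × Int × List Int)),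
    s = p ++ cs →
    (cs.foldl stepA (acc, (p.length : Int) - rfindNl p - 1, (p.count '\n' : Int))).1
      = acc ++ (PySem.List.enumerate cs (p.length : Int)).filterMap (cellB s) := by
  intro cs
  induction cs with
  | nil => intro p acc _; simp [PySem.List.enumerate_nil]
  | cons c r ih =>
    intro p acc hs
    have hsr : s = (p ++ [c]) ++ r := by simpa [List.append_assoc] using hs
    have htake : s.take p.length = p := by rw [hs]; exact List.take_left
    have hlen : (((p ++ [c]).length : Int)) = (p.length : Int) + 1 := by
      simp
    rw [PySem.List.enumerate_cons, List.foldl_cons]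
    by_cases hc : c = '\n'
    · subst hc
      have h1 : stepA (acc, (p.length : Int) - rfindNl p - 1, (p.count '\n' : Int)) '\n'
          = (acc, 0, (p.count '\n' : Int) + 1) := by simp [stepA]
      have h2 : ((((p ++ ['\n']).length : Int)) - rfindNl (p ++ ['\n']) - 1) = 0 := by
        rw [rfindNl_snoc]; simp
      have h3 : (((p ++ ['\n']).count '\n' : Int)) = (p.count '\n' : Int) + 1 := by
        simp [List.count_append]
      have := ih (p ++ ['\n']) acc hsr
      rw [h2, h3, hlen] at this
      rw [h1, this]
      simp [cellB]
    · have h2 : ((((p ++ [c]).length : Int)) - rfindNl (p ++ [c]) - 1)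
          = ((p.length : Int) - rfindNl p - 1) + 1 := by
        rw [rfindNl_snoc, if_neg hc, hlen]; ring
      have h3 : (((p ++ [c]).count '\n' : Int)) = (p.count '\n' : Int) := by
        simp [List.count_append, hc]
      have hcell : cellB s ((p.length : Int), c)
          = some ((p.length : Int) - rfindNl p - 1, (p.count '\n' : Int),
              if c ≠ '.' then [(PySem.Int.ofChars? [c]).getD 0]
              else [1, 2, 3, 4, 5, 6, 7, 8, 9]) := by
        simp only [cellB, if_neg hc, Int.toNat_natCast, htake]
      by_cases hd : c = '.'
      · subst hd
        have h1 : stepA (acc, (p.length : Int) - rfindNl p - 1, (p.count '\n' : Int)) '.'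
            = (acc ++ [((p.length : Int) - rfindNl p - 1, (p.count '\n' : Int),
                [1, 2, 3, 4, 5, 6, 7, 8, 9])],
               ((p.length : Int) - rfindNl p - 1) + 1, (p.count '\n' : Int)) := by
          simp [stepA]
        have := ih (p ++ ['.']) (acc ++ [((p.length : Int) - rfindNl p - 1,
            (p.count '\n' : Int), [1, 2, 3, 4, 5, 6, 7, 8, 9])]) hsr
        rw [h2, h3, hlen] at this
        rw [h1, this, List.filterMap_cons, hcell]
        simp
      · have h1 : stepA (acc, (p.length : Int) - rfindNl p - 1, (p.count '\n' : Int)) c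
            = (acc ++ [((p.length : Int) - rfindNl p - 1, (p.count '\n' : Int),
                [(PySem.Int.ofChars? [c]).getD 0])],
               ((p.length : Int) - rfindNl p - 1) + 1, (p.count '\n' : Int)) := by
          simp [stepA, hc, hd]
        have := ih (p ++ [c]) (acc ++ [((p.length : Int) - rfindNl p - 1,
            (p.count '\n' : Int), [(PySem.Int.ofChars? [c]).getD 0])]) hsr
        rw [h2, h3, hlen] at this
        rw [h1, this, List.filterMap_cons, hcell]
        simp [hd]

theorem main_eq (string : String) : get_sudoku_list string = get_sudoku_list_alt string := by
  have h := loop_eq string.toList string.toList [] [] (by simp)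
  simpa [get_sudoku_list, get_sudoku_list_alt, rfindNl] using h

-- ===== VERDICT (by name: the statement is the Claim_ definition above) =====
theorem get_sudoku_list_spec : Claim_equal_get_sudoku_list := by
  intro string _ _
  exact main_eq string
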